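-- pv_equiv track=rewrite | github.com/mirrash7/Basketball | team_assigner/team_assigner.py | enforce_temporal_consistency
-- ===== SOURCE A (Python) =====
-- def enforce_temporal_consistency(frame_assignments):
--     """
--     Enforce temporal consistency by preventing players from switching teams.
--
--     Args:
--         frame_assignments (list): List of team assignments for each frame
--
--     Returns:
--         list: Temporally consistent team assignments
--     """
--     # Track player team history
--     player_team_history = {}
--     consistent_assignments = []
--
--     for frame_idx, frame_assignment in enumerate(frame_assignments):
--         consistent_frame = {}
--
--         for player_id, team_id in frame_assignment.items():
--             if player_id in player_team_history:
--                 # Player has been assigned before - maintain consistency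
--                 consistent_frame[player_id] = player_team_history[player_id]
--             else:
--                 # New player - assign team and record
--                 consistent_frame[player_id] = team_id
--                 player_team_history[player_id] = team_id
--
--         consistent_assignments.append(consistent_frame)
--
--     return consistent_assignments
-- ===== SOURCE B (Python) =====
-- def enforce_temporal_consistency(frame_assignments):
--     """Two-pass: build a first-seen team table once, then emit every frame by pure lookup."""
--     first_team = {}
--     for frame_assignment in frame_assignments:
--         for player_id, team_id in frame_assignment.items():
--             if player_id not in first_team:
--                 first_team[player_id] = team_id
--     return [{player_id: first_team[player_id] for player_id in frame_assignment}
--             for frame_assignment in frame_assignments]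
-- ===== Notes on version B (the rewrite author's own statement) =====
-- stated objective: alternative
-- what changed: A interleaves recording and emission in one pass with an if/else per player; B first builds the complete first-seen table in one pass and then emits every frame by a uniform branch-free table lookup in a second pass.
import Mathlib
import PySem

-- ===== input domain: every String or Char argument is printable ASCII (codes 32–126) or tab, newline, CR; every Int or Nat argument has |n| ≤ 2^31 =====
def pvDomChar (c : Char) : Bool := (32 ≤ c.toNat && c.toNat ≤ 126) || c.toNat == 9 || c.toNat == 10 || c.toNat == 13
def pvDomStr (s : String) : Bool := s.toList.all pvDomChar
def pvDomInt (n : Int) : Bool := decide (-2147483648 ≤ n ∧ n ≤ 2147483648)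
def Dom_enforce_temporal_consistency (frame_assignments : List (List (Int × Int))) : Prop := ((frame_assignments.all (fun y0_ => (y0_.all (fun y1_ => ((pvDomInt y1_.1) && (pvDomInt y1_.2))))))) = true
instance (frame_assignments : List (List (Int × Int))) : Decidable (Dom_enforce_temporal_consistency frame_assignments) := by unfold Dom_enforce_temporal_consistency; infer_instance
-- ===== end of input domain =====

-- B replaces A's interleaved record-and-emit if/else with a table-building pass followed
-- by a branch-free lookup pass (alternative decomposition, same cost).

-- ===== PORT A =====
-- one step of A's inner loop: state is (player_team_history, consistent_frame)
def pvAStep (st : PySem.Dict Int Int × PySem.Dict Int Int) (pr : Int × Int) :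
    PySem.Dict Int Int × PySem.Dict Int Int :=
  if st.1.contains pr.1 then
    (st.1, st.2.insert pr.1 (st.1.getD pr.1 0))
  else
    (st.1.insert pr.1 pr.2, st.2.insert pr.1 pr.2)

-- one step of A's outer loop: run the frame, append consistent_frame.items
def pvAOuter (st : PySem.Dict Int Int × List (List (Int × Int))) (frame_assignment : List (Int × Int)) :
    PySem.Dict Int Int × List (List (Int × Int)) :=
  let r := frame_assignment.foldl pvAStep (st.1, PySem.Dict.empty)
  (r.1, st.2 ++ [r.2.items])

def enforce_temporal_consistency (frame_assignments : List (List (Int × Int))) : List (List (Int × Int)) :=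
  (frame_assignments.foldl pvAOuter (PySem.Dict.empty, [])).2

-- ===== PORT B =====
-- first pass: record each player's team only when not already present (first-seen wins)
def pvFirstStep (d : PySem.Dict Int Int) (pr : Int × Int) : PySem.Dict Int Int :=
  if d.contains pr.1 then d else d.insert pr.1 pr.2

def pvFirstUpd (d : PySem.Dict Int Int) (frame : List (Int × Int)) : PySem.Dict Int Int :=
  frame.foldl pvFirstStep d

-- second pass: emit a frame purely by lookup in the finished table
def pvEmit (first : PySem.Dict Int Int) (frame : List (Int × Int)) : List (Int × Int) :=
  (frame.foldl (fun (cf : PySem.Dict Int Int) pr => cf.insert pr.1 (first.getD pr.1 0))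
    PySem.Dict.empty).items

def enforce_temporal_consistency_alt (frame_assignments : List (List (Int × Int))) : List (List (Int × Int)) :=
  let first := frame_assignments.foldl pvFirstUpd PySem.Dict.empty
  frame_assignments.map (pvEmit first)

-- ===== PRECONDITION & SPEC =====
def Spec_enforce_temporal_consistency (frame_assignments : List (List (Int × Int))) (out : List (List (Int × Int))) : Prop := out = enforce_temporal_consistency_alt frame_assignments
instance (frame_assignments : List (List (Int × Int))) (out : List (List (Int × Int))) : Decidable (Spec_enforce_temporal_consistency frame_assignments out) := by unfold Spec_enforce_temporal_consistency; infer_instance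

-- ===== CLAIM (what is proved, stated in full; the proofs are below) =====
def Claim_equal_enforce_temporal_consistency : Prop := ∀ (frame_assignments : List (List (Int × Int))), Dom_enforce_temporal_consistency frame_assignments → Spec_enforce_temporal_consistency frame_assignments (enforce_temporal_consistency frame_assignments)

-- ===== LEMMAS AND PROOFS =====

-- first-wins updates never change an existing binding
theorem pvFirstStep_get? (d : PySem.Dict Int Int) (pr : Int × Int) (k : Int)
    (h : d.contains k = true) : (pvFirstStep d pr).get? k = d.get? k := by
  unfold pvFirstStep
  split
  · rfl
  · rename_i hc
    by_cases hk : k = pr.1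
    · subst hk; simp [hc] at h
    · exact PySem.Dict.get?_insert_of_ne _ _ hk

theorem pvFirstStep_contains (d : PySem.Dict Int Int) (pr : Int × Int) (k : Int)
    (h : d.contains k = true) : (pvFirstStep d pr).contains k = true := by
  unfold pvFirstStep
  split
  · exact h
  · simp [PySem.Dict.contains_insert, h]

theorem pvFirstUpd_get? (f : List (Int × Int)) (d : PySem.Dict Int Int) (k : Int)
    (h : d.contains k = true) : (pvFirstUpd d f).get? k = d.get? k := by
  induction f generalizing d with
  | nil => rfl
  | cons pr rest ih =>
      show (pvFirstUpd (pvFirstStep d pr) rest).get? k = d.get? k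
      rw [ih _ (pvFirstStep_contains d pr k h), pvFirstStep_get? d pr k h]

theorem pvFirstUpd_contains (f : List (Int × Int)) (d : PySem.Dict Int Int) (k : Int)
    (h : d.contains k = true) : (pvFirstUpd d f).contains k = true := by
  induction f generalizing d with
  | nil => exact h
  | cons pr rest ih => exact ih _ (pvFirstStep_contains d pr k h)

theorem pvFirstAll_get? (fs : List (List (Int × Int))) (d : PySem.Dict Int Int) (k : Int)
    (h : d.contains k = true) : (fs.foldl pvFirstUpd d).get? k = d.get? k := by
  induction fs generalizing d with
  | nil => rfl
  | cons f rest ih =>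
      show (rest.foldl pvFirstUpd (pvFirstUpd d f)).get? k = d.get? k
      rw [ih _ (pvFirstUpd_contains f d k h), pvFirstUpd_get? f d k h]

-- per-frame: A's inner fold is (first-wins history update, B's branch-free emission)
theorem pvFrame_eq (first : PySem.Dict Int Int) (f : List (Int × Int))
    (h cf : PySem.Dict Int Int)
    (hyp : ∀ k, (pvFirstUpd h f).contains k = true →
      first.get? k = (pvFirstUpd h f).get? k) :
    f.foldl pvAStep (h, cf) =
      (pvFirstUpd h f,
       f.foldl (fun (c : PySem.Dict Int Int) pr => c.insert pr.1 (first.getD pr.1 0)) cf) := by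
  induction f generalizing h cf with
  | nil => rfl
  | cons pr rest ih =>
      have hstep : pvFirstUpd h (pr :: rest) = pvFirstUpd (pvFirstStep h pr) rest := rfl
      by_cases hc : h.contains pr.1 = true
      · have hs : pvFirstStep h pr = h := by unfold pvFirstStep; simp [hc]
        have hval : first.getD pr.1 0 = h.getD pr.1 0 := by
          have h1 : (pvFirstUpd h (pr :: rest)).contains pr.1 = true := by
            rw [hstep, hs]; exact pvFirstUpd_contains rest h pr.1 hc
          have h2 := hyp pr.1 h1
          rw [hstep, hs, pvFirstUpd_get? rest h pr.1 hc] at h2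
          simp [PySem.Dict.getD_eq_get?_getD, h2]
        have hA : pvAStep (h, cf) pr = (h, cf.insert pr.1 (h.getD pr.1 0)) := by
          unfold pvAStep; simp [hc]
        show (pr :: rest).foldl pvAStep (h, cf) = _
        rw [List.foldl_cons, hA,
          ih h (cf.insert pr.1 (h.getD pr.1 0)) (by rw [hstep, hs] at hyp; exact hyp)]
        rw [hstep, hs, List.foldl_cons, hval]
      · have hcf : h.contains pr.1 = false := by simpa using hc
        have hs : pvFirstStep h pr = h.insert pr.1 pr.2 := by unfold pvFirstStep; simp [hcf]
        have hval : first.getD pr.1 0 = pr.2 := by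
          have hck : (h.insert pr.1 pr.2).contains pr.1 = true :=
            PySem.Dict.contains_insert_self _ _ _
          have h1 : (pvFirstUpd h (pr :: rest)).contains pr.1 = true := by
            rw [hstep, hs]; exact pvFirstUpd_contains rest _ pr.1 hck
          have h2 := hyp pr.1 h1
          rw [hstep, hs, pvFirstUpd_get? rest _ pr.1 hck,
            PySem.Dict.get?_insert_self] at h2
          simp [PySem.Dict.getD_eq_get?_getD, h2]
        have hA : pvAStep (h, cf) pr = (h.insert pr.1 pr.2, cf.insert pr.1 pr.2) := by
          unfold pvAStep; simp [hcf]
        show (pr :: rest).foldl pvAStep (h, cf) = _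
        rw [List.foldl_cons, hA,
          ih (h.insert pr.1 pr.2) (cf.insert pr.1 pr.2) (by rw [hstep, hs] at hyp; exact hyp)]
        rw [hstep, hs, List.foldl_cons, hval]

-- outer loop: A's accumulated frames are B's mapped frames
theorem pvOuter_eq (first : PySem.Dict Int Int) (fs : List (List (Int × Int)))
    (h : PySem.Dict Int Int) (acc : List (List (Int × Int)))
    (hfirst : first = fs.foldl pvFirstUpd h) :
    (fs.foldl pvAOuter (h, acc)).2 = acc ++ fs.map (pvEmit first) := by
  induction fs generalizing h acc with
  | nil => simp
  | cons f rest ih =>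
      have hyp : ∀ k, (pvFirstUpd h f).contains k = true →
          first.get? k = (pvFirstUpd h f).get? k := by
        intro k hk
        rw [hfirst]
        exact pvFirstAll_get? rest (pvFirstUpd h f) k hk
      show (rest.foldl pvAOuter (pvAOuter (h, acc) f)).2 = _
      have hA : pvAOuter (h, acc) f = (pvFirstUpd h f, acc ++ [pvEmit first f]) := by
        unfold pvAOuter pvEmit
        rw [pvFrame_eq first f h PySem.Dict.empty hyp]
      rw [hA, ih (pvFirstUpd h f) (acc ++ [pvEmit first f]) hfirst]
      simp

-- ===== VERDICT (by name: the statement is the Claim_ definition above) =====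
theorem enforce_temporal_consistency_spec : Claim_equal_enforce_temporal_consistency := by
  intro fa _
  show enforce_temporal_consistency fa = enforce_temporal_consistency_alt fa
  unfold enforce_temporal_consistency enforce_temporal_consistency_alt
  rw [pvOuter_eq (fa.foldl pvFirstUpd PySem.Dict.empty) fa PySem.Dict.empty [] rfl]
  simp
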